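-- pv_equiv track=rewrite | github.com/memoization-over-Recursion/Algorithms-and-data-structures | rectangleMania.py | countTriangles
-- ===== SOURCE A (Python) =====
-- def getStringOfCoord(coords):
--      x , y = coords
--      return str(x) + "-" + str(y)
--
-- def countTriangles( coords , table ):
--     answer = 0
--     for x1 , y1 in coords:
--         for x2 , y2 in coords:
--             if not upperRight( [ x1 , y1 ] , [ x2 , y2 ] ):
--                 continue
--             upper = getStringOfCoord([ x1 , y2 ])
--             right = getStringOfCoord([ x2 , y1 ])
--             if upper in table and right in table:
--                 answer+=1
--     return answer
--
-- def upperRight( a , b ):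
--     x1 , y1 = a
--     x2 , y2 = b
--     return x2 > x1 and y2 > y1
-- ===== SOURCE B (Python) =====
-- def getStringOfCoord(coords):
--     x, y = coords
--     return str(x) + "-" + str(y)
--
--
-- def countTriangles(coords, table):
--     byx = {}
--     for x, y in coords:
--         byx.setdefault(x, []).append(y)
--     answer = 0
--     for x1, ys1 in byx.items():
--         for x2, ys2 in byx.items():
--             if x2 <= x1:
--                 continue
--             for y1 in ys1:
--                 for y2 in ys2:
--                     if y2 > y1 and getStringOfCoord([x1, y2]) in table and getStringOfCoord([x2, y1]) in table:
--                         answer += 1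
--     return answer
-- ===== Notes on version B (the rewrite author's own statement) =====
-- stated objective: alternative
-- what changed: B first groups coords into a dict mapping each x-coordinate to its list of y-values (preserving duplicates), then scans ordered pairs of distinct columns with x1 < x2 and pairs y1 in column x1 with y2 > y1 in column x2, replacing A's flat scan over all ordered point pairs with its per-pair upperRight guard.
import Mathlib
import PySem

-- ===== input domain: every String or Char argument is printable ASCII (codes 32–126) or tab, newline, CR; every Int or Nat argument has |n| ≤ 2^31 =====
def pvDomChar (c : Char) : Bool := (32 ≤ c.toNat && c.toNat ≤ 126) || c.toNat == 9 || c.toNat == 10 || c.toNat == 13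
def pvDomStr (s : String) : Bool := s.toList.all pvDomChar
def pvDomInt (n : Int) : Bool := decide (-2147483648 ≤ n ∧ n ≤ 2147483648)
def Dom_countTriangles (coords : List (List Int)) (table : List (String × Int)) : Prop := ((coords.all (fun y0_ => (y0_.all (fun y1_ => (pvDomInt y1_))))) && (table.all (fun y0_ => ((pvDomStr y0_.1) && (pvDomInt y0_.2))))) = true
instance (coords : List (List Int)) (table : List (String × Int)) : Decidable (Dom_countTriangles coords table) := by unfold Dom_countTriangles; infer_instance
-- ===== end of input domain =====

-- B builds a dict from x-coordinate to its column of y-values once and scans ordered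
-- column pairs with x1 < x2, instead of A's flat scan over all ordered point pairs.

-- ===== PORT A =====
def getStringOfCoord (c : List Int) : String :=
  match c with
  | [x, y] => PySem.Int.toStr x ++ "-" ++ PySem.Int.toStr y
  | _ => ""   -- Python's unpacking raises here; excluded by Pre_

def upperRight (a b : List Int) : Bool :=
  match a, b with
  | [x1, y1], [x2, y2] => decide (x2 > x1) && decide (y2 > y1)
  | _, _ => false   -- Python's unpacking raises here; excluded by Pre_

def countTriangles (coords : List (List Int)) (table : List (String × Int)) : Int :=
  coords.foldl (fun answer p =>
    coords.foldl (fun answer q =>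
      match p, q with
      | [x1, y1], [x2, y2] =>
        if !(upperRight [x1, y1] [x2, y2]) then answer
        else if (table.map Prod.fst).contains (getStringOfCoord [x1, y2]) &&
                (table.map Prod.fst).contains (getStringOfCoord [x2, y1]) then answer + 1
        else answer
      | _, _ => answer) answer) 0

-- ===== PORT B =====
def countTriangles_alt (coords : List (List Int)) (table : List (String × Int)) : Int :=
  let byx : PySem.Dict Int (List Int) :=
    coords.foldl (fun d p =>
      match p with
      | [x, y] => d.modify x [] (· ++ [y])
      | _ => d) PySem.Dict.empty   -- Python's unpacking raises on non-pairs; excluded by Pre_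
  byx.items.foldl (fun answer kv1 =>
    byx.items.foldl (fun answer kv2 =>
      if kv2.1 ≤ kv1.1 then answer
      else kv1.2.foldl (fun answer y1 =>
        kv2.2.foldl (fun answer y2 =>
          if decide (y2 > y1) &&
             (table.map Prod.fst).contains (getStringOfCoord [kv1.1, y2]) &&
             (table.map Prod.fst).contains (getStringOfCoord [kv2.1, y1]) then answer + 1
          else answer) answer) answer) answer) 0

-- ===== PRECONDITION & SPEC =====
-- Pre_ excludes coordinate entries that are not two-element lists: there Python's
-- tuple unpacking 'for x, y in coords' raises ValueError in both A and B.
def Pre_countTriangles (coords : List (List Int)) (table : List (String × Int)) : Prop :=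
  ∀ p ∈ coords, p.length = 2
instance (coords : List (List Int)) (table : List (String × Int)) : Decidable (Pre_countTriangles coords table) := by unfold Pre_countTriangles; infer_instance

def pvWitness_countTriangles : List (List Int) × (List (String × Int)) :=
  ([[0, 0], [0, 1], [1, 0], [1, 1]], [("0-0", 1), ("0-1", 1), ("1-0", 1), ("1-1", 1)])

def Spec_countTriangles (coords : List (List Int)) (table : List (String × Int)) (out : Int) : Prop := out = countTriangles_alt coords table
instance (coords : List (List Int)) (table : List (String × Int)) (out : Int) : Decidable (Spec_countTriangles coords table out) := by unfold Spec_countTriangles; infer_instance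

-- ===== CLAIM (what is proved, stated in full; the proofs are below) =====
def Claim_equal_countTriangles : Prop := ∀ (coords : List (List Int)) (table : List (String × Int)), Dom_countTriangles coords table → Pre_countTriangles coords table → Spec_countTriangles coords table (countTriangles coords table)

-- ===== LEMMAS AND PROOFS =====

-- membership of a corner's key string in the table
def memT (table : List (String × Int)) (x y : Int) : Bool :=
  (table.map Prod.fst).contains (getStringOfCoord [x, y])

-- contribution of the ordered point pair ((x1,y1),(x2,y2))
def G (table : List (String × Int)) (x1 y1 x2 y2 : Int) : Int :=
  if upperRight [x1, y1] [x2, y2] && (memT table x1 y2 && memT table x2 y1) then 1 else 0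

-- contribution of (y1, y2) inside a column pair (x1, x2) with x1 < x2
def t (table : List (String × Int)) (x1 x2 y1 y2 : Int) : Int :=
  if decide (y2 > y1) && (memT table x1 y2 && memT table x2 y1) then 1 else 0

def toL (q : Int × Int) : List Int := [q.1, q.2]

def col (pl : List (Int × Int)) (x : Int) : List Int :=
  (pl.filter (fun p => p.1 == x)).map (·.2)

-- inner double sum over two columns
def Skey (table : List (String × Int)) (x1 x2 : Int) (ys1 ys2 : List Int) : Int :=
  (ys1.map (fun y1 => (ys2.map (fun y2 => t table x1 x2 y1 y2)).sum)).sum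

lemma foldl_body_add {α : Type} (body : Int → α → Int) (g : α → Int)
    (h : ∀ a x, body a x = a + g x) (l : List α) (a : Int) :
    l.foldl body a = a + (l.map g).sum := by
  have hb : body = fun a x => a + g x := funext fun a => funext fun x => h a x
  rw [hb, PySem.List.foldl_add]

lemma sum_indicator (K : List Int) (c : Int) (v : Int) (hn : K.Nodup) (hc : c ∈ K) :
    (K.map (fun x => if c = x then v else 0)).sum = v := by
  induction K with
  | nil => cases hc
  | cons k t ih =>
    rcases List.mem_cons.1 hc with h | h
    · subst h
      have : ∀ x ∈ t, (if c = x then v else 0) = 0 := by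
        intro x hx
        have : c ≠ x := fun he => (List.nodup_cons.1 hn).1 (he ▸ hx)
        simp [this]
      simp [List.map_congr_left this]
    · have hne : c ≠ k := fun he => (List.nodup_cons.1 hn).1 (he ▸ h)
      simp [hne, ih (List.nodup_cons.1 hn).2 h]

lemma sum_swap {α β : Type} (l : List α) (m : List β) (F : α → β → Int) :
    (l.map (fun a => (m.map (fun b => F a b)).sum)).sum
      = (m.map (fun b => (l.map (fun a => F a b)).sum)).sum := by
  induction l with
  | nil => simp
  | cons p t ih =>
    simp only [List.map_cons, List.sum_cons, ih]
    rw [← PySem.List.sum_map_add_int]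

lemma sum_partition (K : List Int) (pl : List (Int × Int)) (h : Int × Int → Int)
    (hn : K.Nodup) (hk : ∀ p ∈ pl, p.1 ∈ K) :
    (pl.map h).sum = (K.map (fun x => ((col pl x).map (fun y => h (x, y))).sum)).sum := by
  induction pl with
  | nil => simp [col]
  | cons p t ih =>
    have hkt : ∀ q ∈ t, q.1 ∈ K := fun q hq => hk q (List.mem_cons_of_mem _ hq)
    have hcol : ∀ x, col (p :: t) x = (if p.1 = x then [p.2] else []) ++ col t x := by
      intro x
      by_cases hx : p.1 = x <;> simp [col, hx]
    have hsplit : ∀ x, ((col (p :: t) x).map (fun y => h (x, y))).sum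
        = (if p.1 = x then h p else 0) + ((col t x).map (fun y => h (x, y))).sum := by
      intro x
      rw [hcol x]
      by_cases hx : p.1 = x <;> simp [hx]
      rw [← hx]
    calc ((p :: t).map h).sum = h p + (t.map h).sum := by simp
      _ = (K.map (fun x => if p.1 = x then h p else 0)).sum
            + (K.map (fun x => ((col t x).map (fun y => h (x, y))).sum)).sum := by
            rw [sum_indicator K p.1 (h p) hn (hk p (List.mem_cons_self)), ih hkt]
      _ = (K.map (fun x => ((col (p :: t) x).map (fun y => h (x, y))).sum)).sum := by
            rw [← PySem.List.sum_map_add_int]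
            exact congrArg _ (List.map_congr_left (fun x _ => (hsplit x).symm))

-- A as a double sum over point pairs
lemma A_eq_sum (pl : List (Int × Int)) (table : List (String × Int)) :
    countTriangles (pl.map toL) table
      = (pl.map (fun p => (pl.map (fun q => G table p.1 p.2 q.1 q.2)).sum)).sum := by
  unfold countTriangles
  rw [List.foldl_map,
    foldl_body_add _ (fun p => (pl.map (fun q => G table p.1 p.2 q.1 q.2)).sum) ?_ pl 0,
    zero_add]
  intro a p
  rw [List.foldl_map,
    foldl_body_add _ (fun q => G table p.1 p.2 q.1 q.2) ?_ pl a]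
  intro b q
  show (if !(upperRight [p.1, p.2] [q.1, q.2]) then b
        else if (table.map Prod.fst).contains (getStringOfCoord [p.1, q.2]) &&
                (table.map Prod.fst).contains (getStringOfCoord [q.1, p.2]) then b + 1
        else b) = b + G table p.1 p.2 q.1 q.2
  cases hu : upperRight [p.1, p.2] [q.1, q.2] <;>
    cases hm : (table.map Prod.fst).contains (getStringOfCoord [p.1, q.2]) &&
               (table.map Prod.fst).contains (getStringOfCoord [q.1, p.2]) <;>
    (simp only [G, memT, hu, hm]; simp)

-- B as a double sum over key pairs
lemma B_eq_sum (pl : List (Int × Int)) (table : List (String × Int)) :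
    countTriangles_alt (pl.map toL) table
      = ((PySem.Set.ofList (pl.map Prod.fst)).map (fun x1 =>
          ((PySem.Set.ofList (pl.map Prod.fst)).map (fun x2 =>
            if x2 ≤ x1 then 0 else Skey table x1 x2 (col pl x1) (col pl x2))).sum)).sum := by
  have hD : ((pl.map toL).foldl (fun d p =>
      match p with
      | [x, y] => d.modify x [] (· ++ [y])
      | _ => d) PySem.Dict.empty)
      = pl.foldl (fun d p => d.modify p.1 [] (· ++ [p.2])) PySem.Dict.empty := by
    rw [List.foldl_map]
    rfl
  simp only [countTriangles_alt]
  rw [hD]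
  set D := pl.foldl (fun d p => d.modify p.1 [] (· ++ [p.2])) PySem.Dict.empty with hDdef
  have hnd : D.keys.Nodup :=
    PySem.Dict.nodup_keys_foldl_modify_key pl Prod.fst [] (fun d p => (· ++ [p.2])) _
      PySem.Dict.nodup_keys_empty
  have hkeys : D.keys = PySem.Set.ofList (pl.map Prod.fst) := by
    rw [hDdef, PySem.Dict.keys_foldl_modify_key, PySem.Dict.keys_empty,
      PySem.Set.update_nil_left]
  have hgetD : ∀ x, D.getD x [] = col pl x := by
    intro x
    rw [hDdef, PySem.Dict.getD_foldl_modify_append, PySem.Dict.getD_empty]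
    simp [col]
  have hitems : D.items = (PySem.Set.ofList (pl.map Prod.fst)).map (fun x => (x, col pl x)) := by
    rw [PySem.Dict.items_eq_map_keys D hnd [], hkeys]
    exact List.map_congr_left (fun x _ => by rw [hgetD x])
  have hin2 : ∀ (x1 x2 y1 : Int) (ys2 : List Int) (c : Int),
      ys2.foldl (fun answer y2 =>
        if decide (y2 > y1) &&
           (table.map Prod.fst).contains (getStringOfCoord [x1, y2]) &&
           (table.map Prod.fst).contains (getStringOfCoord [x2, y1]) then answer + 1
        else answer) c
      = c + (ys2.map (fun y2 => t table x1 x2 y1 y2)).sum := by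
    intro x1 x2 y1 ys2 c
    apply foldl_body_add
    intro e y2
    cases hd : decide (y2 > y1) <;>
      cases h1 : (table.map Prod.fst).contains (getStringOfCoord [x1, y2]) <;>
      cases h2 : (table.map Prod.fst).contains (getStringOfCoord [x2, y1]) <;>
      (simp only [t, memT, hd, h1, h2]; simp)
  have hin1 : ∀ (x1 x2 : Int) (ys1 ys2 : List Int) (a : Int),
      ys1.foldl (fun answer y1 =>
        ys2.foldl (fun answer y2 =>
          if decide (y2 > y1) &&
             (table.map Prod.fst).contains (getStringOfCoord [x1, y2]) &&
             (table.map Prod.fst).contains (getStringOfCoord [x2, y1]) then answer + 1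
          else answer) answer) a
      = a + Skey table x1 x2 ys1 ys2 := by
    intro x1 x2 ys1 ys2 a
    unfold Skey
    apply foldl_body_add
    intro b y1
    exact hin2 x1 x2 y1 ys2 b
  have hx2 : ∀ (a : Int) (kv1 : Int × List Int),
      D.items.foldl (fun answer kv2 =>
        if kv2.1 ≤ kv1.1 then answer
        else kv1.2.foldl (fun answer y1 =>
          kv2.2.foldl (fun answer y2 =>
            if decide (y2 > y1) &&
               (table.map Prod.fst).contains (getStringOfCoord [kv1.1, y2]) &&
               (table.map Prod.fst).contains (getStringOfCoord [kv2.1, y1]) then answer + 1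
            else answer) answer) answer) a
      = a + (D.items.map (fun kv2 =>
          if kv2.1 ≤ kv1.1 then 0 else Skey table kv1.1 kv2.1 kv1.2 kv2.2)).sum := by
    intro a kv1
    apply foldl_body_add
    intro b kv2
    by_cases hle : kv2.1 ≤ kv1.1
    · simp [hle]
    · rw [if_neg hle, if_neg hle, hin1 kv1.1 kv2.1 kv1.2 kv2.2 b]
  rw [foldl_body_add _ (fun kv1 : Int × List Int => (D.items.map (fun kv2 =>
      if kv2.1 ≤ kv1.1 then 0 else Skey table kv1.1 kv2.1 kv1.2 kv2.2)).sum) hx2 D.items 0,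
    zero_add]
  simp only [hitems, List.map_map]
  rfl

lemma main_eq (pl : List (Int × Int)) (table : List (String × Int)) :
    countTriangles (pl.map toL) table = countTriangles_alt (pl.map toL) table := by
  rw [A_eq_sum, B_eq_sum]
  set K := PySem.Set.ofList (pl.map Prod.fst) with hK
  have hn : K.Nodup := PySem.Set.nodup_ofList _
  have hk : ∀ p ∈ pl, p.1 ∈ K := by
    intro p hp
    rw [hK, PySem.Set.mem_ofList]
    exact List.mem_map_of_mem hp
  rw [sum_partition K pl (fun p => (pl.map (fun q => G table p.1 p.2 q.1 q.2)).sum) hn hk]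
  apply congrArg
  apply List.map_congr_left
  intro x1 _
  show ((col pl x1).map (fun y1 => (pl.map (fun q => G table x1 y1 q.1 q.2)).sum)).sum = _
  calc ((col pl x1).map (fun y1 => (pl.map (fun q => G table x1 y1 q.1 q.2)).sum)).sum
      = ((col pl x1).map (fun y1 => (K.map (fun x2 =>
          ((col pl x2).map (fun y2 => G table x1 y1 x2 y2)).sum)).sum)).sum :=
        congrArg _ (List.map_congr_left fun y1 _ =>
          sum_partition K pl (fun q => G table x1 y1 q.1 q.2) hn hk)
    _ = (K.map (fun x2 => ((col pl x1).map (fun y1 =>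
          ((col pl x2).map (fun y2 => G table x1 y1 x2 y2)).sum)).sum)).sum :=
        sum_swap (col pl x1) K _
    _ = (K.map (fun x2 =>
          if x2 ≤ x1 then 0 else Skey table x1 x2 (col pl x1) (col pl x2))).sum := by
        apply congrArg
        apply List.map_congr_left
        intro x2 _
        by_cases hle : x2 ≤ x1
        · rw [if_pos hle]
          have hnlt : ¬ (x1 < x2) := not_lt.2 hle
          have hz : ∀ y1 y2 : Int, G table x1 y1 x2 y2 = 0 := by
            intro y1 y2
            simp [G, upperRight, hnlt]
          simp [hz]
        · rw [if_neg hle]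
          have hlt : x1 < x2 := lt_of_not_ge hle
          have hGt : ∀ y1 y2 : Int, G table x1 y1 x2 y2 = t table x1 x2 y1 y2 := by
            intro y1 y2
            simp [G, t, upperRight, hlt]
          unfold Skey
          exact congrArg _ (List.map_congr_left fun y1 _ =>
            congrArg _ (List.map_congr_left fun y2 _ => hGt y1 y2))

lemma exists_pl (coords : List (List Int)) (h : ∀ p ∈ coords, p.length = 2) :
    ∃ pl : List (Int × Int), coords = pl.map toL := by
  induction coords with
  | nil => exact ⟨[], rfl⟩
  | cons p t ih =>
    obtain ⟨pl, hpl⟩ := ih (fun q hq => h q (List.mem_cons_of_mem _ hq))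
    have hp := h p (List.mem_cons_self)
    match p, hp with
    | [x, y], _ => exact ⟨(x, y) :: pl, by simp [toL, hpl]⟩

-- ===== VERDICT (by name: the statement is the Claim_ definition above) =====
theorem countTriangles_spec : Claim_equal_countTriangles := by
  intro coords table _ hpre
  obtain ⟨pl, rfl⟩ := exists_pl coords hpre
  exact (main_eq pl table).symm ▸ rfl
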